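/- GENERATED by tools/from_farm_form.py from prooffarm-gif/accepted/DGifGetImageDesc.2/Proof.lean (a worked proof of the farm's unit `DGifGetImageDesc.2`,
   accepted by the verdict) — do not edit. -/
import Gif.Spec.Units.DGifGetImageDesc_2
import Gif.Spec.AllSegs
import Gif.Spec.Proved.DGifGetImageDesc_2_Lemmas

open X86 X86.User Asan ProgX.Base ProgX.Base.Spec Gif.Spec

/-!
  `DGifGetImageDesc.2` (0x1094b5 … 0x109503 and 0x1095d1 … 0x1095e6, 25 instructions; dgif_lib.c:444-452): the SavedImages array
  grows by one slot. The forest decides the first test: without an array (`Fc.saved = none`) the checked load of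
  `gif.SavedImages` gives NULL and the segment leaves to 0x1095e6 (`seg2_none`). With the array `sv` the segment calls
  `openbsd_reallocarray(sv.arr, length + 1, 56)` (`seg2_call`, to the private assertion `seg2_AtRet7` at the call's return address
  0x1094ea), and `seg2_tail` walks each of the three outcomes of `ReallocPost` to its exit (Lemmas.lean).
-/

/-- Segment 2 of `DGifGetImageDesc` takes `Mid` at 0x1094b5 to `Grown` at 0x109503, `NoArray` at 0x1095e6 or `Done` at 0x10949a. -/
theorem Gif.Spec.Proved.DGifGetImageDesc_2_ok : Gif.Spec.DGifGetImageDesc_2.Statement := by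
  intro Lay hLay μ hμ u₀ hcode h_ra h_load8 h_load4 h_store8 h_store4 H rest frames F R e ret Hc Fc v hmid
  cases hsv : Fc.saved with
  | none =>
    -- dgif_lib.c:444 `GifFile->SavedImages == NULL`: 0x1094b5 … 0x1095e6
    refine (Gif.Spec.DGifGetImageDesc_2.seg2_none Lay hLay μ hμ u₀ hcode h_load8 H rest frames F R e ret Hc Fc v hmid
      hsv).trans ?_
    intro x hx
    exact ReachVia.done (Or.inr (Or.inl hx))
  | some sv =>
    -- the array is a live object of the heap: its capacity `c` is the ghost `reallocarray`'s contract asks for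
    obtain ⟨c, hlc⟩ := hmid.at_.ok.owns.live (sv.arr, 56 * sv.cap)
      (Forest.mem_owned_saved (by rw [hsv]; exact List.mem_cons_self))
    have hra := h_ra Hc rest frames (56 * sv.cap) c
    -- 0x1094b5 … the call … 0x1094ea
    refine (Gif.Spec.DGifGetImageDesc_2.seg2_call Lay hLay μ hμ u₀ hcode h_load8 h_load4 H rest frames F R e ret Hc Fc v sv
      c hra hmid hsv hlc).trans ?_
    -- 0x1094ea … 0x109503 (in place, moved) or 0x1095d1 … 0x10949a (failed)
    intro w hat7
    exact Gif.Spec.DGifGetImageDesc_2.seg2_tail Lay hLay μ hμ u₀ hcode h_store8 h_store4 H rest frames F R e ret Hc Fc sv c v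
      w hat7
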